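-- pv_equiv track=rewrite | github.com/MoiiL/Python-Data-Structures-Algorithms | Live Coding/W2-Algorithms-Intro/Pset3.py | subordinates
-- ===== SOURCE A (Python) =====
-- def subordinates(ls):
--     max_len = len(ls)
--     count = 0
--     temp = []
--     for l in ls:
--         if ls.count(l) > 1 and l not in temp:
--             count += 1
--             temp.append(l)
--     diff = max_len - count
--     ls = sorted(ls)
--     return ((ls,diff))
-- ===== SOURCE B (Python) =====
-- def subordinates(ls):
--     s = sorted(ls)
--     n = len(s)
--     reps = 0
--     i = 0
--     while i < n:
--         j = i + 1
--         while j < n and s[j] == s[i]: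
--             j += 1
--         if j - i >= 2:
--             reps += 1
--         i = j
--     return ((s, n - reps))
-- ===== Notes on version B (the rewrite author's own statement) =====
-- stated objective: faster
-- what changed: B sorts first and counts repeated values in one adjacent-run scan over the sorted list, instead of A's per-element ls.count() and temp-membership rescans.
import Mathlib
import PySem

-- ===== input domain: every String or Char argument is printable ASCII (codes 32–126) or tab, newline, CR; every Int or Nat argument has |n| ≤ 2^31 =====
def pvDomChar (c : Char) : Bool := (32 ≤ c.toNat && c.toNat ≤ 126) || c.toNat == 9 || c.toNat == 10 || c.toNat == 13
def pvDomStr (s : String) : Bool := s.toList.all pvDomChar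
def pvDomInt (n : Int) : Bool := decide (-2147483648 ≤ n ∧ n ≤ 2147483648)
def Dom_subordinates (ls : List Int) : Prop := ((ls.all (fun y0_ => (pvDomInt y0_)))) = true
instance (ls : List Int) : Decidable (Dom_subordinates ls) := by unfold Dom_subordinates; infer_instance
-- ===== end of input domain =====

-- B replaces A's quadratic per-element count/membership rescans by one sort followed by a
-- single adjacent-run scan; measured faster on large inputs (asymptotic change).

-- ===== PORT A =====
-- state is (count, temp); one step of A's for-loop over the fixed original list ls
def subAStep (ls : List Int) (st : Int × List Int) (l : Int) : Int × List Int :=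
  if 1 < PySem.List.count ls l ∧ l ∉ st.2 then (st.1 + 1, st.2 ++ [l]) else st

def subordinates (ls : List Int) : List Int × Int :=
  let max_len : Int := ls.length
  let st := ls.foldl (subAStep ls) (0, [])
  let diff := max_len - st.1
  (PySem.List.sorted ls (fun x => x) false, diff)

-- ===== PORT B =====
-- outer while-loop of Source B: the inner while advancing j is the takeWhile prefix of equal
-- elements, and i = j restarts the scan on the dropWhile suffix
def repsSorted : List Int → Int
  | [] => 0
  | x :: rest =>
      (if 2 ≤ (rest.takeWhile (fun y => y == x)).length + 1 then 1 else 0)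
        + repsSorted (rest.dropWhile (fun y => y == x))
  termination_by s => s.length
  decreasing_by
    simpa using Nat.lt_succ_of_le (List.length_dropWhile_le _ _)

def subordinates_alt (ls : List Int) : List Int × Int :=
  let s := PySem.List.sorted ls (fun x => x) false
  let n : Int := s.length
  (s, n - repsSorted s)

-- ===== PRECONDITION & SPEC =====
def Spec_subordinates (ls : List Int) (out : List Int × Int) : Prop := out = subordinates_alt ls
instance (ls : List Int) (out : List Int × Int) : Decidable (Spec_subordinates ls out) := by unfold Spec_subordinates; infer_instance

-- ===== CLAIM (what is proved, stated in full; the proofs are below) =====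
def Claim_equal_subordinates : Prop := ∀ (ls : List Int), Dom_subordinates ls → Spec_subordinates ls (subordinates ls)

-- ===== LEMMAS AND PROOFS =====

-- the common value both loops compute: the number of distinct elements of l occurring more than once in l
def nreps (l : List Int) : Int := ((l.toFinset.filter (fun x => 1 < l.count x)).card : Int)

-- A-side: the fold keeps count = temp.length
theorem subA_fst_eq_len (ls : List Int) :
    ∀ (suf : List Int) (temp : List Int),
      (suf.foldl (subAStep ls) ((temp.length : Int), temp)).1
        = ((suf.foldl (subAStep ls) ((temp.length : Int), temp)).2.length : Int) := by
  intro suf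
  induction suf with
  | nil => intro temp; simp
  | cons l suf ih =>
    intro temp
    simp only [List.foldl_cons, subAStep]
    split_ifs with h
    · have := ih (temp ++ [l])
      simpa using this
    · exact ih temp

-- A-side: membership in the final temp
theorem subA_mem (ls : List Int) :
    ∀ (suf : List Int) (st : Int × List Int) (x : Int),
      x ∈ (suf.foldl (subAStep ls) st).2 ↔ x ∈ st.2 ∨ (x ∈ suf ∧ 1 < ls.count x) := by
  intro suf
  induction suf with
  | nil => intro st x; simp
  | cons l suf ih =>
    intro st x
    simp only [List.foldl_cons, subAStep, PySem.List.count]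
    split_ifs with h
    · rw [ih]
      simp only [List.mem_append, List.mem_cons]
      by_cases hx : x = l
      · subst hx; have := h.1; tauto
      · tauto
    · rw [ih]
      simp only [List.mem_cons]
      by_cases hx : x = l
      · subst hx
        push Not at h
        constructor
        · tauto
        · rintro (h1 | ⟨(h2 | h2), h3⟩)
          · exact Or.inl h1
          · exact Or.inl (h h3)
          · exact Or.inr ⟨h2, h3⟩
      · tauto

-- A-side: the final temp has no duplicates
theorem subA_nodup (ls : List Int) :
    ∀ (suf : List Int) (st : Int × List Int), st.2.Nodup → (suf.foldl (subAStep ls) st).2.Nodup := by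
  intro suf
  induction suf with
  | nil => intro st h; exact h
  | cons l suf ih =>
    intro st h
    simp only [List.foldl_cons, subAStep]
    split_ifs with hc
    · refine ih _ ?_
      simp [List.nodup_append, h]
      intro a ha e
      exact hc.2 (e ▸ ha)
    · exact ih _ h

theorem subA_count (ls : List Int) :
    (ls.foldl (subAStep ls) (0, [])).1 = nreps ls := by
  have h0 := subA_fst_eq_len ls ls []
  simp only [List.length_nil, Nat.cast_zero] at h0
  rw [h0]
  set temp := (ls.foldl (subAStep ls) (0, [])).2 with htemp
  have hnd : temp.Nodup := subA_nodup ls ls (0, []) (by simp)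
  have hmem : ∀ x, x ∈ temp ↔ x ∈ ls ∧ 1 < ls.count x := by
    intro x
    rw [htemp, subA_mem ls ls (0, []) x]
    simp
  unfold nreps
  congr 1
  rw [← List.toFinset_card_of_nodup hnd]
  congr 1
  ext x
  simp [hmem x]

-- B-side: on a nondecreasing list, the run scan counts the distinct repeated elements
theorem repsSorted_eq_aux :
    ∀ (n : Nat) (s : List Int), s.length ≤ n → s.Pairwise (· ≤ ·) → repsSorted s = nreps s := by
  intro n
  induction n with
  | zero =>
    intro s hlen _
    have : s = [] := List.eq_nil_of_length_eq_zero (Nat.le_zero.mp hlen)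
    subst this
    simp [repsSorted, nreps]
  | succ n ih =>
    intro s hlen hs
    cases s with
    | nil => simp [repsSorted, nreps]
    | cons x rest =>
      set t := rest.takeWhile (fun y => y == x) with ht'
      set d := rest.dropWhile (fun y => y == x) with hd'
      have hrest : t ++ d = rest := List.takeWhile_append_dropWhile
      have ht : ∀ y ∈ t, y = x := by
        intro y hy
        have := List.mem_takeWhile_imp hy
        exact eq_of_beq this
      have hxle : ∀ y ∈ rest, x ≤ y := (List.pairwise_cons.mp hs).1
      have hpr : rest.Pairwise (· ≤ ·) := (List.pairwise_cons.mp hs).2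
      have hdsub : d.Sublist rest := List.dropWhile_sublist _
      have hdp : d.Pairwise (· ≤ ·) := hpr.sublist hdsub
      have hxd : ∀ y ∈ d, x < y := by
        intro y hy
        cases hdd : d with
        | nil => rw [hdd] at hy; cases hy
        | cons hh dd =>
          have hhne : ¬ (hh == x) = true := by
            have h0 : 0 < (rest.dropWhile (fun y => y == x)).length := by
              rw [← hd', hdd]; simp
            have := List.dropWhile_get_zero_not (p := fun y => y == x) rest h0
            simpa [← hd', hdd] using this
          have hhx : x < hh := by
            have : x ≤ hh := hxle hh (hdsub.mem (by rw [hdd]; exact List.mem_cons_self ..))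
            rcases lt_or_eq_of_le this with h' | h'
            · exact h'
            · exact absurd (by simp [← h']) hhne
          rw [hdd] at hy
          rcases List.mem_cons.mp hy with h' | h'
          · rw [h']; exact hhx
          · have : hh ≤ y := (List.pairwise_cons.mp (by rw [hdd] at hdp; exact hdp)).1 y h'
            exact lt_of_lt_of_le hhx this
      have hxnotd : x ∉ d := fun hx => lt_irrefl x (hxd x hx)
      have hcx : (x :: rest).count x = t.length + 1 := by
        rw [← hrest, List.count_cons_self, List.count_append]
        rw [List.count_eq_length.mpr (fun b hb => (ht b hb).symm)]
        rw [List.count_eq_zero.mpr hxnotd]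
      have hcy : ∀ y ∈ d, (x :: rest).count y = d.count y := by
        intro y hy
        have hyne : y ≠ x := ne_of_gt (hxd y hy)
        rw [← hrest, List.count_cons_of_ne (id (Ne.symm hyne)), List.count_append]
        rw [List.count_eq_zero.mpr (fun hyt => hyne (ht y hyt))]
        omega
      have hfin : (x :: rest).toFinset = insert x d.toFinset := by
        ext y
        simp only [List.toFinset_cons, ← hrest, List.toFinset_append, Finset.mem_insert,
          Finset.mem_union, List.mem_toFinset]
        constructor
        · rintro (h' | h' | h')
          · exact Or.inl h'
          · exact Or.inl (ht y h')
          · exact Or.inr h'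
        · tauto
      have hxnotfd : x ∉ d.toFinset.filter (fun y => 1 < d.count y) := by
        simp [hxnotd]
      have hfilter : (x :: rest).toFinset.filter (fun y => 1 < (x :: rest).count y)
          = if 1 < t.length + 1 then
              insert x (d.toFinset.filter (fun y => 1 < d.count y))
            else d.toFinset.filter (fun y => 1 < d.count y) := by
        rw [hfin, Finset.filter_insert, hcx]
        have hcong : d.toFinset.filter (fun y => 1 < (x :: rest).count y)
            = d.toFinset.filter (fun y => 1 < d.count y) :=
          Finset.filter_congr (fun y hy => by rw [hcy y (List.mem_toFinset.mp hy)])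
        rw [hcong]
      have hdlen : d.length ≤ n := by
        have h1 : d.length ≤ rest.length := List.length_dropWhile_le _ _
        have h2 : rest.length + 1 ≤ n + 1 := by simpa using hlen
        omega
      have ihd := ih d hdlen hdp
      rw [repsSorted]
      rw [← ht', ← hd', ihd]
      unfold nreps
      rw [hfilter]
      split_ifs with h1 h2 h3
      · rw [Finset.card_insert_of_notMem hxnotfd]
        push_cast; ring
      · omega
      · omega
      · simp

theorem repsSorted_eq (s : List Int) (hs : s.Pairwise (· ≤ ·)) : repsSorted s = nreps s :=
  repsSorted_eq_aux s.length s le_rfl hs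

theorem nreps_perm {a b : List Int} (h : a.Perm b) : nreps a = nreps b := by
  unfold nreps
  have heq : a.toFinset.filter (fun x => 1 < a.count x)
      = b.toFinset.filter (fun x => 1 < b.count x) := by
    rw [List.toFinset_eq_of_perm a b h]
    exact Finset.filter_congr (fun x _ => by rw [h.count_eq])
  rw [heq]

-- ===== VERDICT (by name: the statement is the Claim_ definition above) =====
theorem subordinates_spec : Claim_equal_subordinates := by
  intro ls _
  unfold Spec_subordinates subordinates subordinates_alt
  have hperm : (PySem.List.sorted ls (fun x => x) false).Perm ls := PySem.List.sorted_perm ..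
  have h1 : repsSorted (PySem.List.sorted ls (fun x => x) false) = nreps ls := by
    rw [repsSorted_eq _ (by simpa using PySem.List.sorted_pairwise ls (fun x => x))]
    exact nreps_perm hperm
  simp only []
  rw [subA_count, h1, hperm.length_eq]
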